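-- pv_equiv track=rewrite | github.com/sarafanshul/Codes | OJs/CompletetheProjects.py | solve
-- ===== SOURCE A (Python) =====
-- def solve(n , r , projects):
-- 	pos = []
-- 	neg = []
--
-- 	for a , b in projects:
-- 		if b < 0:
-- 			neg.append((a , b))
-- 		else:
-- 			pos.append((a , b))
--
-- 	pos.sort()
-- 	neg.sort(key = lambda t : -t[0] -t[1])
--
--
-- 	for a,b in pos:
-- 		if r >= a:
-- 			r += b
-- 		else:
-- 			return False
--
-- 	for a,b in neg:
-- 		if r >= a:
-- 			r += b
-- 			if r < 0 :
-- 				return False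
-- 		else:
-- 			return False
--
-- 	return True
-- ===== SOURCE B (Python) =====
-- def solve(n, r, projects):
--     # Selection-based simulation: no sorting.  While projects remain, greedily
--     # extract the next-best one -- the lexicographically smallest doable-type
--     # project (b >= 0) if any remains, otherwise the first project maximising
--     # a + b -- and run it, failing when the rating is too low or drops below 0.
--     remaining = list(projects)
--     while remaining:
--         pos = [t for t in remaining if t[1] >= 0]
--         if pos:
--             pick = min(pos)
--         else:
--             pick = max(remaining, key=lambda t: t[0] + t[1])
--         remaining.remove(pick)
--         a, b = pick
--         if r < a:
--             return False
--         r += b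
--         if b < 0 and r < 0:
--             return False
--     return True
-- ===== Notes on version B (the rewrite author's own statement) =====
-- stated objective: alternative
-- what changed: Replaced A's partition into pos/neg with two library sorts followed by two sequential simulation loops by a sort-free selection simulation: while projects remain, extract the next project to run directly from the remaining list (the lexicographically smallest project with b >= 0 if any, otherwise the first project maximising a+b) and simulate it, so no sorted order is ever materialised.
import Mathlib
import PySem

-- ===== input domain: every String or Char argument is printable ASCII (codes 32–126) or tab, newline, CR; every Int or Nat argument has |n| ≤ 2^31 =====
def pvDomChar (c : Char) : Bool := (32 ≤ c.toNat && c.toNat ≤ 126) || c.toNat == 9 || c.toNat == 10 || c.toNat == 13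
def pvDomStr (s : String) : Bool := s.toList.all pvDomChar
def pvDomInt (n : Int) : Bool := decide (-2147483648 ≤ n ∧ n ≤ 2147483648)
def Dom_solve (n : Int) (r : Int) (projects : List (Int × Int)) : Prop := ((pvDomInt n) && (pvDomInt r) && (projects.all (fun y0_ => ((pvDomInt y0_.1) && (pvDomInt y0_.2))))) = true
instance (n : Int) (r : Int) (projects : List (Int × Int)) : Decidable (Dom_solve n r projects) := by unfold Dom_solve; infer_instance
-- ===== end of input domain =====

-- B replaces A's partition + two library sorts + two sequential loops by a sort-free
-- selection simulation that repeatedly extracts the next project to run from the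
-- unsorted remaining list (objective: alternative; not claimed faster).

-- ===== PORT A =====
-- 'for a,b in pos: if r >= a: r += b else: return False'  (early return = none)
def solvePosLoop : Int → List (Int × Int) → Option Int
  | r, [] => some r
  | r, (a, b) :: rest => if r ≥ a then solvePosLoop (r + b) rest else none

-- 'for a,b in neg: if r >= a: r += b; if r < 0: return False else: return False'
def solveNegLoop : Int → List (Int × Int) → Bool
  | _, [] => true
  | r, (a, b) :: rest => if r ≥ a then (if r + b < 0 then false else solveNegLoop (r + b) rest) else false

def solve (n : Int) (r : Int) (projects : List (Int × Int)) : Bool :=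
  let pn := projects.foldl
    (fun s t => if t.2 < 0 then (s.1, s.2 ++ [t]) else (s.1 ++ [t], s.2)) ([], [])
  let pos := PySem.List.sorted2 pn.1 (fun t => t.1) (fun t => t.2)   -- pos.sort() on pairs
  let neg := PySem.List.sorted pn.2 (fun t => -t.1 - t.2) false      -- neg.sort(key=lambda t: -t[0]-t[1])
  match solvePosLoop r pos with
  | none => false
  | some r' => solveNegLoop r' neg

-- ===== PORT B =====
-- 'while remaining: pick = min(pos) or max(remaining, key=a+b); remaining.remove(pick); simulate'
-- fuel = initial length; the 'none' / fuel-0 arms are unreachable totality guards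
def solveAltGo : Nat → Int → List (Int × Int) → Bool
  | 0, _, _ => true
  | fuel+1, r, remaining =>
    match remaining with
    | [] => true
    | _ :: _ =>
      match (match remaining.filter (fun t => decide (0 ≤ t.2)) with
             | [] => PySem.List.max? remaining (fun t => t.1 + t.2)                       -- max(remaining, key=lambda t: t[0]+t[1])
             | p :: ps => PySem.List.min2? (p :: ps) (fun t => t.1) (fun t => t.2)) with  -- min(pos)
      | none => true
      | some pick =>
        match PySem.List.remove? remaining pick with                                      -- remaining.remove(pick)
        | none => true
        | some remaining' =>
          if r < pick.1 then false
          else if pick.2 < 0 ∧ r + pick.2 < 0 then false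
          else solveAltGo fuel (r + pick.2) remaining'

def solve_alt (n : Int) (r : Int) (projects : List (Int × Int)) : Bool :=
  solveAltGo projects.length r projects

-- ===== PRECONDITION & SPEC =====
def Spec_solve (n : Int) (r : Int) (projects : List (Int × Int)) (out : Bool) : Prop := out = solve_alt n r projects
instance (n : Int) (r : Int) (projects : List (Int × Int)) (out : Bool) : Decidable (Spec_solve n r projects out) := by unfold Spec_solve; infer_instance

-- ===== CLAIM =====
def Claim_equal_solve : Prop := ∀ (n : Int) (r : Int) (projects : List (Int × Int)), Dom_solve n r projects → Spec_solve n r projects (solve n r projects)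

-- ===== LEMMAS AND PROOFS =====

-- A's partition loop = two filters
theorem partition_fold (xs : List (Int × Int)) (P N : List (Int × Int)) :
    xs.foldl (fun s t => if t.2 < 0 then (s.1, s.2 ++ [t]) else (s.1 ++ [t], s.2)) (P, N) =
      (P ++ xs.filter (fun t => !decide (t.2 < 0)), N ++ xs.filter (fun t => decide (t.2 < 0))) := by
  induction xs generalizing P N with
  | nil => simp
  | cons t xs ih =>
      by_cases h : t.2 < 0 <;> simp [h, ih]

theorem posLoop_cons (r : Int) (t : Int × Int) (rest : List (Int × Int)) :
    solvePosLoop r (t :: rest) = if r ≥ t.1 then solvePosLoop (r + t.2) rest else none := by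
  obtain ⟨a, b⟩ := t; rfl

theorem negLoop_cons (r : Int) (t : Int × Int) (rest : List (Int × Int)) :
    solveNegLoop r (t :: rest) =
      if r ≥ t.1 then (if r + t.2 < 0 then false else solveNegLoop (r + t.2) rest) else false := by
  obtain ⟨a, b⟩ := t; rfl

-- the running-extremum fold returns its FIRST strict optimum: the scanned list splits
-- as u ++ m :: v with m strictly better than everything in u and at least as good as v
theorem foldl_best_split {α : Type} (b : α → α → Bool)
    (htrans : ∀ x y z, b x y = true → b y z = true → b x z = true)
    (hmix : ∀ x y z, b x y = true → b z y = false → b x z = true) :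
    ∀ (ps : List α) (p : α), ∃ u v,
      p :: ps = u ++ (ps.foldl (fun m t => if b t m = true then t else m) p) :: v ∧
      (∀ y ∈ u, b (ps.foldl (fun m t => if b t m = true then t else m) p) y = true) ∧
      (∀ y ∈ v, b y (ps.foldl (fun m t => if b t m = true then t else m) p) = false) := by
  intro ps
  induction ps with
  | nil => intro p; exact ⟨[], [], by simp, by simp, by simp⟩
  | cons t ps ih =>
      intro p
      by_cases hb : b t p = true
      · simp only [List.foldl_cons, hb, if_true]
        obtain ⟨u', v', hsplit, hu', hv'⟩ := ih t
        refine ⟨p :: u', v', ?_, ?_, hv'⟩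
        · rw [List.cons_append]
          exact congrArg (p :: ·) hsplit
        · intro y hy
          rcases List.mem_cons.1 hy with rfl | hy'
          · cases u' with
            | nil =>
                simp only [List.nil_append] at hsplit
                injection hsplit with h1 _
                exact h1 ▸ hb
            | cons a u'' =>
                simp only [List.cons_append] at hsplit
                injection hsplit with h1 _
                exact htrans _ _ _ (hu' a (by simp)) (h1 ▸ hb)
          · exact hu' y hy'
      · have hb' : b t p = false := by revert hb; cases b t p <;> simp
        simp only [List.foldl_cons, hb', Bool.false_eq_true, if_false]
        obtain ⟨u', v', hsplit, hu', hv'⟩ := ih p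
        cases u' with
        | nil =>
            simp only [List.nil_append] at hsplit
            injection hsplit with h1 h2
            refine ⟨[], t :: ps, by rw [← h1]; rfl, by simp, ?_⟩
            intro y hy
            rcases List.mem_cons.1 hy with rfl | hy'
            · rw [← h1]; exact hb'
            · exact hv' y (h2 ▸ hy')
        | cons a u'' =>
            simp only [List.cons_append] at hsplit
            injection hsplit with h1 h2
            have hFp : b (ps.foldl (fun m t => if b t m = true then t else m) p) p = true := by
              have := hu' a (by simp)
              rwa [← h1] at this
            refine ⟨p :: t :: u'', v', ?_, ?_, hv'⟩
            · rw [List.cons_append, List.cons_append]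
              exact congrArg (fun l => p :: t :: l) h2
            · intro y hy
              rcases List.mem_cons.1 hy with rfl | hy'
              · exact hFp
              · rcases List.mem_cons.1 hy' with rfl | hy''
                · exact hmix _ _ _ hFp hb'
                · exact hu' y (by simp [hy''])

-- running the option-valued extremum fold from 'some m' is the plain fold
theorem foldl_opt {α : Type} (b : α → α → Bool) : ∀ (xs : List α) (m : α),
    xs.foldl (fun acc x =>
      match acc with
      | none => some x
      | some m => if b x m = true then some x else some m) (some m)
    = some (xs.foldl (fun m x => if b x m = true then x else m) m) := by
  intro xs
  induction xs with
  | nil => intro m; rfl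
  | cons x xs ih =>
      intro m
      simp only [List.foldl_cons]
      by_cases h : b x m = true
      · simp only [h, if_true]; exact ih _
      · simp only [h, Bool.false_eq_true, if_false]
        exact ih _

theorem min2?_cons_eq (p : Int × Int) (ps : List (Int × Int)) :
    PySem.List.min2? (p :: ps) (fun t => t.1) (fun t => t.2) =
      some (ps.foldl (fun m x => if (decide (x.1 < m.1) || !decide (m.1 < x.1) && decide (x.2 < m.2)) = true then x else m) p) := by
  have := foldl_opt (fun x m : Int × Int => decide (x.1 < m.1) || !decide (m.1 < x.1) && decide (x.2 < m.2)) ps p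
  simpa only [PySem.List.min2?, List.foldl_cons] using this

theorem max?_cons_eq (p : Int × Int) (ps : List (Int × Int)) :
    PySem.List.max? (p :: ps) (fun t => t.1 + t.2) =
      some (ps.foldl (fun m x => if (decide (m.1 + m.2 < x.1 + x.2)) = true then x else m) p) := by
  have := foldl_opt (fun x m : Int × Int => decide (m.1 + m.2 < x.1 + x.2)) ps p
  simpa only [PySem.List.max?, List.foldl_cons, decide_eq_true_eq] using this

-- elements produced by an insertion-sort fold come from the accumulator or the list
theorem mem_foldl_insertBy {α : Type} (before : α → α → Bool) :
    ∀ (xs acc : List α) (y : α), y ∈ xs.foldl (fun acc x => PySem.List.insertBy before x acc) acc →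
      y ∈ acc ∨ y ∈ xs := by
  intro xs
  induction xs with
  | nil => intro acc y h; exact Or.inl h
  | cons x xs ih =>
      intro acc y h
      rcases ih _ y h with h' | h'
      · rcases (PySem.List.mem_insertBy before x y acc).1 h' with rfl | h''
        · exact Or.inr (by simp)
        · exact Or.inl h''
      · exact Or.inr (by simp [h'])

-- inserting an element that sorts before the whole accumulator puts it at the head
theorem insertBy_all_before {α : Type} (before : α → α → Bool) (x : α) (A : List α)
    (h : ∀ a ∈ A, before x a = true) :
    PySem.List.insertBy before x A = x :: A := by
  cases A with
  | nil => rfl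
  | cons a A' => simp [PySem.List.insertBy, h a (by simp)]

-- folding elements that never sort before m into 'm :: B' keeps m at the head
theorem foldl_insertBy_head {α : Type} (before : α → α → Bool) (m : α) :
    ∀ (v B : List α), (∀ y ∈ v, before y m = false) →
      v.foldl (fun acc x => PySem.List.insertBy before x acc) (m :: B) =
        m :: v.foldl (fun acc x => PySem.List.insertBy before x acc) B := by
  intro v
  induction v with
  | nil => intro B _; rfl
  | cons y v ih =>
      intro B hv
      have hy : before y m = false := hv y (by simp)
      simp only [List.foldl_cons, PySem.List.insertBy, hy, Bool.false_eq_true, if_false]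
      exact ih _ (fun z hz => hv z (by simp [hz]))

-- the head of a stable insertion sort of u ++ m :: v, when m sorts strictly before u
-- and no element of v sorts before m, is m; the tail is the sort of u ++ v
theorem sortfold_head {α : Type} (before : α → α → Bool) (m : α) (u v : List α)
    (hu : ∀ y ∈ u, before m y = true) (hv : ∀ y ∈ v, before y m = false) :
    (u ++ m :: v).foldl (fun acc x => PySem.List.insertBy before x acc) [] =
      m :: (u ++ v).foldl (fun acc x => PySem.List.insertBy before x acc) [] := by
  have hA : ∀ a ∈ u.foldl (fun acc x => PySem.List.insertBy before x acc) [], before m a = true := by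
    intro a ha
    rcases mem_foldl_insertBy before u [] a ha with h | h
    · cases h
    · exact hu a h
  calc (u ++ m :: v).foldl (fun acc x => PySem.List.insertBy before x acc) []
      = v.foldl (fun acc x => PySem.List.insertBy before x acc)
          (PySem.List.insertBy before m (u.foldl (fun acc x => PySem.List.insertBy before x acc) [])) := by
        rw [List.foldl_append]; rfl
    _ = v.foldl (fun acc x => PySem.List.insertBy before x acc)
          (m :: u.foldl (fun acc x => PySem.List.insertBy before x acc) []) := by
        rw [insertBy_all_before before m _ hA]
    _ = m :: (u ++ v).foldl (fun acc x => PySem.List.insertBy before x acc) [] := by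
        rw [foldl_insertBy_head before m v _ hv, List.foldl_append]

-- erasing an element that passes the filter commutes with filtering
theorem erase_filter_pos (p : (Int × Int) → Bool) (v : Int × Int) (hv : p v = true) :
    ∀ xs : List (Int × Int), v ∈ xs → (xs.erase v).filter p = (xs.filter p).erase v := by
  intro xs
  induction xs with
  | nil => intro h; cases h
  | cons x xs ih =>
      intro hmem
      by_cases hx : x = v
      · subst hx
        simp [List.erase_cons_head, hv]
      · have hmem' : v ∈ xs := by
          rcases List.mem_cons.1 hmem with h | h
          · exact absurd h.symm hx
          · exact h
        rw [List.erase_cons_tail (by simpa using hx)]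
        by_cases hpx : p x = true
        · simp only [List.filter_cons, hpx, if_true]
          rw [List.erase_cons_tail (by simpa using hx), ih hmem']
        · have hpx' : p x = false := by revert hpx; cases p x <;> simp
          simp only [List.filter_cons, hpx', Bool.false_eq_true, if_false]
          exact ih hmem'

-- erasing an element that fails the filter leaves the filtered list unchanged
theorem erase_filter_neg (p : (Int × Int) → Bool) (v : Int × Int) (hv : p v = false) :
    ∀ xs : List (Int × Int), (xs.erase v).filter p = xs.filter p := by
  intro xs
  induction xs with
  | nil => rfl
  | cons x xs ih =>
      by_cases hx : x = v
      · subst hx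
        simp [List.erase_cons_head, hv]
      · rw [List.erase_cons_tail (by simpa using hx)]
        simp only [List.filter_cons, ih]

-- the two filter predicates B uses versus A's partition tests
theorem filt_pos_eq : (fun t : Int × Int => !decide (t.2 < 0)) = (fun t : Int × Int => decide (0 ≤ t.2)) := by
  funext t
  by_cases h : t.2 < 0 <;> simp [h] <;> omega

theorem filt_neg_eq : (fun t : Int × Int => decide (t.2 < 0)) = (fun t : Int × Int => !decide (0 ≤ t.2)) := by
  funext t
  by_cases h : t.2 < 0 <;> simp [h] <;> omega

-- MASTER LEMMA: the selection simulation equals A's two-phase loop over the sorted lists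
theorem altGo_eq : ∀ (k : Nat) (r : Int) (xs : List (Int × Int)), xs.length ≤ k →
    solveAltGo k r xs =
      (match solvePosLoop r (PySem.List.sorted2 (xs.filter (fun t => decide (0 ≤ t.2))) (fun t => t.1) (fun t => t.2)) with
       | none => false
       | some r' => solveNegLoop r' (PySem.List.sorted (xs.filter (fun t => !decide (0 ≤ t.2))) (fun t => -t.1 - t.2) false)) := by
  intro k
  induction k with
  | zero =>
      intro r xs hlen
      have hnil : xs = [] := List.eq_nil_of_length_eq_zero (Nat.le_zero.mp hlen)
      subst hnil; rfl
  | succ k ihk =>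
      intro r xs hlen
      cases xs with
      | nil => rfl
      | cons h tl =>
        rcases hP : (h :: tl).filter (fun t => decide (0 ≤ t.2)) with _ | ⟨p, ps⟩
        · -- no doable-type project remains: everything is negative
          have hall : ∀ t ∈ h :: tl, t.2 < 0 := by
            intro t ht
            have := List.filter_eq_nil_iff.mp hP t ht
            simp only [decide_eq_true_eq] at this
            omega
          obtain ⟨u, v, hsplit, hu, hv⟩ :=
            foldl_best_split (fun x m : Int × Int => decide (m.1 + m.2 < x.1 + x.2))
              (by intro x y z h1 h2; simp at h1 h2 ⊢; omega)
              (by intro x y z h1 h2; simp at h1 h2 ⊢; omega)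
              tl h
          set m := tl.foldl (fun m t => if (decide (m.1 + m.2 < t.1 + t.2)) = true then t else m) h with hm
          have hm_mem : m ∈ h :: tl := by rw [hsplit]; simp
          have hmu : m ∉ u := by
            intro hyu
            have := hu m hyu
            simp at this
          have herase : (h :: tl).erase m = u ++ v := by
            rw [hsplit, List.erase_append_right _ hmu, List.erase_cons_head]
          have hmemuv : ∀ y ∈ u ++ v, y ∈ h :: tl := by
            intro y hy
            rw [hsplit]
            rcases List.mem_append.1 hy with h' | h'
            · exact List.mem_append.2 (Or.inl h')
            · exact List.mem_append.2 (Or.inr (by simp [h']))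
          have hsorted : PySem.List.sorted (h :: tl) (fun t => -t.1 - t.2) false =
              m :: PySem.List.sorted (u ++ v) (fun t => -t.1 - t.2) false := by
            rw [PySem.List.sorted_eq_foldl_insertBy, PySem.List.sorted_eq_foldl_insertBy, hsplit]
            apply sortfold_head
            · intro y hy
              have := hu y hy
              simp only [decide_eq_true_eq] at this ⊢
              omega
            · intro y hy
              have := hv y hy
              simp only [decide_eq_false_iff_not] at this ⊢
              omega
          have hm2 : m.2 < 0 := hall m hm_mem
          -- unfold B one step
          simp only [solveAltGo, hP, max?_cons_eq,
            PySem.List.remove?_eq_some_erase (h :: tl) m hm_mem, herase, ← hm]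
          -- simplify A's side
          have hnegself : (h :: tl).filter (fun t => !decide (0 ≤ t.2)) = h :: tl := by
            apply List.filter_eq_self.mpr
            intro t ht
            have := hall t ht
            simp only [Bool.not_eq_eq_eq_not, Bool.not_true, decide_eq_false_iff_not]
            omega
          rw [hnegself, hsorted]
          have hposnil : PySem.List.sorted2 ([] : List (Int × Int)) (fun t => t.1) (fun t => t.2) = [] := rfl
          rw [hposnil]
          simp only [solvePosLoop, negLoop_cons]
          by_cases hr : r < m.1
          · simp [hr, show ¬ r ≥ m.1 by omega]
          · by_cases hr2 : r + m.2 < 0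
            · simp [hr, hr2, hm2, show r ≥ m.1 by omega]
            · have hlen' : (u ++ v).length ≤ k := by
                have : (h :: tl).length = (u ++ (m :: v)).length := by rw [hsplit]
                simp only [List.length_cons, List.length_append] at this hlen ⊢
                omega
              have hfilterP : (u ++ v).filter (fun t => decide (0 ≤ t.2)) = [] := by
                apply List.filter_eq_nil_iff.mpr
                intro t ht
                have := hall t (hmemuv t ht)
                simp only [decide_eq_true_eq]
                omega
              have hfilterN : (u ++ v).filter (fun t => !decide (0 ≤ t.2)) = u ++ v := by
                apply List.filter_eq_self.mpr
                intro t ht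
                have := hall t (hmemuv t ht)
                simp only [Bool.not_eq_eq_eq_not, Bool.not_true, decide_eq_false_iff_not]
                omega
              rw [ihk (r + m.2) (u ++ v) hlen', hfilterP, hfilterN, hposnil]
              simp [hr, hr2, hm2, show r ≥ m.1 by omega, solvePosLoop]
        · -- some doable-type project remains: pick = min(pos)
          obtain ⟨u, v, hsplit, hu, hv⟩ :=
            foldl_best_split (fun x m : Int × Int => decide (x.1 < m.1) || !decide (m.1 < x.1) && decide (x.2 < m.2))
              (by intro x y z h1 h2; simp at h1 h2 ⊢; omega)
              (by intro x y z h1 h2; simp at h1 h2 ⊢; omega)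
              ps p
          set m := ps.foldl (fun m t => if (decide (t.1 < m.1) || !decide (m.1 < t.1) && decide (t.2 < m.2)) = true then t else m) p with hm
          have hmP : m ∈ p :: ps := by rw [hsplit]; simp
          have hmF : m ∈ (h :: tl).filter (fun t => decide (0 ≤ t.2)) := by rw [hP]; exact hmP
          have hm_mem : m ∈ h :: tl := (List.mem_filter.mp hmF).1
          have hm2 : (0 : Int) ≤ m.2 := by
            have := (List.mem_filter.mp hmF).2
            simpa using this
          have hmu : m ∉ u := by
            intro hyu
            have := hu m hyu
            simp at this
          have heraseF : (p :: ps).erase m = u ++ v := by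
            rw [hsplit, List.erase_append_right _ hmu, List.erase_cons_head]
          have hsort2 : PySem.List.sorted2 (p :: ps) (fun t => t.1) (fun t => t.2) =
              m :: PySem.List.sorted2 (u ++ v) (fun t => t.1) (fun t => t.2) := by
            have e : ∀ ys : List (Int × Int), PySem.List.sorted2 ys (fun t => t.1) (fun t => t.2) =
                ys.foldl (fun acc x => PySem.List.insertBy
                  (fun a b => decide (a.1 < b.1) || !decide (b.1 < a.1) && decide (a.2 < b.2)) x acc) [] :=
              fun _ => rfl
            rw [e, e, hsplit]
            exact sortfold_head _ m u v hu hv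
          have heraseP : ((h :: tl).erase m).filter (fun t => decide (0 ≤ t.2)) = u ++ v := by
            rw [erase_filter_pos (fun t => decide (0 ≤ t.2)) m (by simpa using hm2) _ hm_mem, hP, heraseF]
          have heraseN : ((h :: tl).erase m).filter (fun t => !decide (0 ≤ t.2)) =
              (h :: tl).filter (fun t => !decide (0 ≤ t.2)) :=
            erase_filter_neg _ m (by simp [hm2]) _
          have hlen' : ((h :: tl).erase m).length ≤ k := by
            rw [List.length_erase_of_mem hm_mem]
            simp only [List.length_cons] at hlen ⊢
            omega
          -- unfold B one step
          simp only [solveAltGo, hP, min2?_cons_eq,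
            PySem.List.remove?_eq_some_erase (h :: tl) m hm_mem, ← hm]
          -- simplify A's side
          rw [hsort2, posLoop_cons]
          by_cases hr : r < m.1
          · simp [hr, show ¬ r ≥ m.1 by omega]
          · have hnot2 : ¬ (m.2 < 0 ∧ r + m.2 < 0) := by omega
            rw [ihk (r + m.2) ((h :: tl).erase m) hlen', heraseP, heraseN]
            simp [hr, hnot2, show r ≥ m.1 by omega]

-- ===== VERDICT =====
theorem solve_spec : Claim_equal_solve := by
  intro n r projects _hdom
  unfold Spec_solve solve solve_alt
  rw [partition_fold]
  simp only [List.nil_append]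
  rw [filt_pos_eq, filt_neg_eq]
  exact (altGo_eq projects.length r projects le_rfl).symm
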